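-- pv_equiv track=rewrite | github.com/blasfir/srom-3 | tttttt.py | galueAdd
-- ===== SOURCE A (Python) =====
-- def make_eq(A, B):
--     if len(A) < len(B):
--         A = [0] * (len(B) - len(A)) + A
--     if len(A) > len(B):
--         B = [0] * (len(A) - len(B)) + B
--     return A, B
--
-- def deleteExtraZeros(A):
--     while A and A[0] == 0:
--         A.pop(0)
--     if not A:
--         return [0]
--     return A
--
-- def galueAdd(A, B):
--     A = deleteExtraZeros(A)
--     B = deleteExtraZeros(B)
--     A, B = make_eq(A, B)
--     result = []
--     for i in range(len(A)):
--         k = int(A[i]) + int(B[i])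
--         n = k % 2
--         result.append(n)
--     result = deleteExtraZeros(result)
--     return result
-- ===== SOURCE B (Python) =====
-- def _enc(A):
--     # integer whose binary digits are the parities of A's elements (divide & conquer)
--     if not A:
--         return 0
--     if len(A) == 1:
--         return int(A[0]) & 1
--     h = len(A) // 2
--     return (_enc(A[:h]) << (len(A) - h)) | _enc(A[h:])
--
-- def _dec(x, w):
--     # the w binary digits of x, most significant first (divide & conquer)
--     if w == 1:
--         return [x]
--     h = w // 2
--     return _dec(x >> h, w - h) + _dec(x & ((1 << h) - 1), h)
--
-- def galueAdd(A, B):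
--     # Encode each list as one big integer (bit i = parity of the element i places
--     # from the end; leading zeros vanish automatically), XOR the two integers,
--     # then decode the result back into its binary digit list ([0] when it is 0).
--     x = _enc(A) ^ _enc(B)
--     return _dec(x, x.bit_length()) if x else [0]
-- ===== Notes on version B (the rewrite author's own statement) =====
-- stated objective: alternative
-- what changed: B replaces A's list pipeline (trim, pad to equal length, indexed elementwise (a+b)%2 loop, re-trim) by integer arithmetic: each list is encoded divide-and-conquer into one big integer whose binary digits are the elements' parities, the two integers are XORed, and the result's bit_length-wide digit string is decoded divide-and-conquer back into a list; A's in-place pop(0) mutation of its arguments is not reproduced, the claim is about the return value.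
import Mathlib
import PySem

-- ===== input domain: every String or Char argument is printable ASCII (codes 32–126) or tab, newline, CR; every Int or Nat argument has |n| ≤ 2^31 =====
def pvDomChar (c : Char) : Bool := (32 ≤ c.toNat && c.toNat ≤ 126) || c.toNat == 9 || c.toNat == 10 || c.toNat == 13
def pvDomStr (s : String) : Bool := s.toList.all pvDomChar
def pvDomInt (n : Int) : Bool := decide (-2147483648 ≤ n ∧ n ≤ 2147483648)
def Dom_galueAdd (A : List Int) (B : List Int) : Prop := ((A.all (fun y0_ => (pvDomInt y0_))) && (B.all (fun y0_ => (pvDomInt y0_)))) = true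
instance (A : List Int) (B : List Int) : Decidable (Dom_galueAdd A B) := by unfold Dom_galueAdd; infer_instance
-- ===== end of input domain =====

-- B replaces A's list pipeline (trim, pad, elementwise (a+b)%2 loop, re-trim) by integer
-- arithmetic: each list is encoded (divide & conquer) as one integer whose binary digits are
-- the elements' parities, the two integers are XORed, and the result is decoded back into its
-- binary digit list ("alternative"). A mutates its arguments in place via deleteExtraZeros's
-- pop(0); B does not — the equivalence proved here is about the return value only.

-- ===== PORT A =====
-- deleteExtraZeros: pop leading zeros; empty -> [0]
def delZeros : List Int → List Int
  | [] => [0]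
  | a :: t => if a = 0 then delZeros t else a :: t

-- make_eq: front-pad the shorter list with zeros
def makeEq (A B : List Int) : List Int × List Int :=
  let A' := if A.length < B.length then List.replicate (B.length - A.length) 0 ++ A else A
  let B' := if A'.length > B.length then List.replicate (A'.length - B.length) 0 ++ B else B
  (A', B')

def galueAdd (A : List Int) (B : List Int) : List Int :=
  let A1 := delZeros A
  let B1 := delZeros B
  let p := makeEq A1 B1
  let result := (PySem.List.pyRange 0 p.1.length 1).foldl
    (fun acc i =>
      let k := PySem.List.pyGetD p.1 i 0 + PySem.List.pyGetD p.2 i 0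
      let n := PySem.Int.mod k 2
      acc ++ [n]) []
  delZeros result

-- ===== PORT B =====
-- _enc: halve the list, encode both halves, shift-or them together; int(a) & 1 is
-- PySem.Int.band a 1 (a Python nonnegative int, carried as Nat); fuel = length bounds
-- the recursion depth
def encGo : Nat → List Int → Nat
  | _, [] => 0
  | _, [a] => (PySem.Int.band a 1).toNat
  | 0, _ => 0          -- fuel exhausted: unreachable for fuel ≥ length
  | f + 1, L =>
      encGo f (L.take (L.length / 2)) <<< (L.length - L.length / 2)
        ||| encGo f (L.drop (L.length / 2))

def enc (L : List Int) : Nat := encGo L.length L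

-- _dec: split the width, decode high and low parts; x >> h, x & ((1 << h) - 1) are
-- Nat's >>> and &&&; fuel = width bounds the recursion depth
def decGo : Nat → Nat → Nat → List Int
  | _, _, 0 => []      -- width 0: Python's _dec is never called with it (x ≠ 0)
  | _, x, 1 => [(x : Int)]
  | 0, _, _ => []      -- fuel exhausted: unreachable for fuel ≥ width
  | f + 1, x, w + 2 =>
      decGo f (x >>> ((w + 2) / 2)) (w + 2 - (w + 2) / 2)
        ++ decGo f (x &&& (1 <<< ((w + 2) / 2) - 1)) ((w + 2) / 2)

def dec (x w : Nat) : List Int := decGo w x w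

def galueAdd_alt (A : List Int) (B : List Int) : List Int :=
  let x := enc A ^^^ enc B
  if x = 0 then [0] else dec x (PySem.Int.bitLength (x : Int))

-- ===== PRECONDITION & SPEC =====
def Spec_galueAdd (A : List Int) (B : List Int) (out : List Int) : Prop := out = galueAdd_alt A B
instance (A : List Int) (B : List Int) (out : List Int) : Decidable (Spec_galueAdd A B out) := by unfold Spec_galueAdd; infer_instance

-- ===== CLAIM (what is proved, stated in full; the proofs are below) =====
def Claim_equal_galueAdd : Prop := ∀ (A : List Int) (B : List Int), Dom_galueAdd A B → Spec_galueAdd A B (galueAdd A B)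

-- ===== LEMMAS AND PROOFS =====

-- the encoding step, elementwise: n -> 2*n + (parity of a)
def parAcc (n : Nat) (a : Int) : Nat := 2 * n + (PySem.Int.band a 1).toNat

theorem parBit_lt_two (a : Int) : (PySem.Int.band a 1).toNat < 2 := by
  rw [PySem.Int.band_one]
  have h1 := PySem.Int.mod_nonneg a (b := 2) (by norm_num)
  have h2 := PySem.Int.mod_lt a (b := 2) (by norm_num)
  omega

-- parity of a sum mod 2 is the XOR of the parities
theorem parBit_add (a b : Int) :
    (PySem.Int.band (PySem.Int.mod (a + b) 2) 1).toNat
      = (PySem.Int.band a 1).toNat ^^^ (PySem.Int.band b 1).toNat := by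
  simp only [PySem.Int.band_one, PySem.Int.mod_eq_emod_of_pos (by norm_num : (0:Int) < 2)]
  have ha : a % 2 = 0 ∨ a % 2 = 1 := by omega
  have hb : b % 2 = 0 ∨ b % 2 = 1 := by omega
  have habs : (a + b) % 2 = (a % 2 + b % 2) % 2 := by rw [Int.add_emod]
  rw [Int.emod_emod_of_dvd _ (by norm_num), habs]
  rcases ha with h | h <;> rcases hb with h' | h' <;> simp [h, h']

-- the bit-pair XOR law: (2n+i) ^^^ (2m+j) = 2(n^^^m) + (i^^^j) for bits i j
theorem two_mul_add_xor (n m i j : Nat) (hi : i < 2) (hj : j < 2) :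
    (2 * n + i) ^^^ (2 * m + j) = 2 * (n ^^^ m) + (i ^^^ j) := by
  interval_cases i <;> interval_cases j
  · simpa [Nat.bit_val] using Nat.xor_bit false n false m
  · simpa [Nat.bit_val] using Nat.xor_bit false n true m
  · simpa [Nat.bit_val] using Nat.xor_bit true n false m
  · simpa [Nat.bit_val] using Nat.xor_bit true n true m

-- A's index loop over equal-length lists is zipWith
theorem loopA_eq_zipWith (X Y : List Int) (h : X.length = Y.length) :
    (PySem.List.pyRange 0 X.length 1).foldl
      (fun acc i => acc ++ [PySem.Int.mod (PySem.List.pyGetD X i 0 + PySem.List.pyGetD Y i 0) 2]) []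
    = List.zipWith (fun a b => PySem.Int.mod (a + b) 2) X Y := by
  rw [PySem.List.foldl_append_singleton_eq_map]
  apply List.ext_getElem
  · simp [PySem.List.length_pyRange_one, h]
  · intro k h1 h2
    have hk : k < X.length := by
      simpa [PySem.List.length_pyRange_one] using h1
    simp only [List.nil_append, List.getElem_map, List.getElem_zipWith]
    rw [PySem.List.getElem_pyRange_one]
    have hk2 : k < Y.length := h ▸ hk
    simp [PySem.List.pyGetD_natCast, hk, hk2]

theorem makeEq_eq (X Y : List Int) :
    makeEq X Y = (List.replicate (Y.length - X.length) 0 ++ X,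
                  List.replicate (X.length - Y.length) 0 ++ Y) := by
  unfold makeEq
  by_cases h : X.length < Y.length
  · simp only [h, if_pos]
    have h1 : (List.replicate (Y.length - X.length) (0:Int) ++ X).length = Y.length := by
      simp; omega
    have h2 : X.length - Y.length = 0 := by omega
    simp [h1, h2]
  · have h2 : Y.length - X.length = 0 := by omega
    by_cases h3 : X.length > Y.length
    · simp [h, h2, h3]
    · simp [h, h2, h3]; omega

-- the encoding of a zipWith-of-parities is the XOR of the encodings (equal lengths)
theorem mask_zipWith (X : List Int) : ∀ (Y : List Int), X.length = Y.length → ∀ n m : Nat,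
    (List.zipWith (fun a b => PySem.Int.mod (a + b) 2) X Y).foldl parAcc (n ^^^ m)
      = X.foldl parAcc n ^^^ Y.foldl parAcc m := by
  induction X with
  | nil => intro Y h n m; cases Y <;> simp_all
  | cons a ta ih =>
    intro Y h n m
    cases Y with
    | nil => simp at h
    | cons b tb =>
      simp only [List.zipWith_cons_cons, List.foldl_cons]
      have hstep : parAcc (n ^^^ m) (PySem.Int.mod (a + b) 2) = parAcc n a ^^^ parAcc m b := by
        simp only [parAcc, parBit_add]
        exact (two_mul_add_xor n m _ _ (parBit_lt_two a) (parBit_lt_two b)).symm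
      rw [hstep, ih tb (by simpa using h)]

-- a run of zeros encodes to 0
theorem mask_rep (k : Nat) : (List.replicate k (0:Int)).foldl parAcc 0 = 0 := by
  have h0 : parAcc 0 0 = 0 := by decide
  induction k with
  | zero => simp
  | succ k ih => simpa [List.replicate_succ, h0] using ih

-- deleteExtraZeros does not change the encoding
theorem mask_delZeros (L : List Int) : (delZeros L).foldl parAcc 0 = L.foldl parAcc 0 := by
  induction L with
  | nil => decide
  | cons a t ih =>
    by_cases h : a = 0
    · subst h; simpa [delZeros, parAcc] using ih
    · simp [delZeros, h]

-- seeded encoding = shift the seed past the list, plus the plain encoding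
theorem foldl_parAcc_shift (Y : List Int) : ∀ n : Nat,
    Y.foldl parAcc n = n * 2 ^ Y.length + Y.foldl parAcc 0 := by
  induction Y with
  | nil => simp
  | cons a t ih =>
    intro n
    rw [List.foldl_cons, List.foldl_cons, ih (parAcc n a), ih (parAcc 0 a)]
    simp only [parAcc, List.length_cons, pow_succ]
    ring

-- the encoding of L fits in |L| bits
theorem foldl_parAcc_lt (L : List Int) : L.foldl parAcc 0 < 2 ^ L.length := by
  induction L with
  | nil => simp
  | cons a t ih =>
    rw [List.foldl_cons, foldl_parAcc_shift]
    have := parBit_lt_two a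
    simp only [parAcc, List.length_cons, pow_succ]
    have h2 : (2:Nat) ^ t.length > 0 := Nat.two_pow_pos _
    nlinarith

-- shift-or of disjoint parts is addition
theorem shl_or_eq_add (k : Nat) : ∀ (m r : Nat), r < 2 ^ k → (m <<< k) ||| r = m * 2 ^ k + r := by
  induction k with
  | zero =>
    intro m r hr
    interval_cases r
    simp [Nat.shiftLeft_eq]
  | succ k ih =>
    intro m r hr
    have h1 : m <<< (k + 1) = Nat.bit false (m <<< k) := by
      simp [Nat.bit_val, Nat.shiftLeft_eq, pow_succ]; ring
    have h2 : r = Nat.bit (decide (r % 2 = 1)) (r / 2) := by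
      rw [Nat.bit_val]
      rcases Nat.mod_two_eq_zero_or_one r with h | h <;> simp [h] <;> omega
    rw [h1, h2, Nat.lor_bit, Nat.bit_val, Nat.bit_val]
    have hlt : r / 2 < 2 ^ k := by omega
    rw [ih m _ hlt]
    rcases Nat.mod_two_eq_zero_or_one r with h | h <;> simp [h, pow_succ] <;> ring

-- B's divide-and-conquer encoder computes the left fold of parAcc
theorem encGo_eq (f : Nat) : ∀ L : List Int, L.length ≤ f → encGo f L = L.foldl parAcc 0 := by
  induction f with
  | zero =>
    intro L hL
    match L with
    | [] => rfl
    | [a] => simp at hL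
  | succ f ih =>
    intro L hL
    match L with
    | [] => rfl
    | [a] => simp [encGo, parAcc]
    | a :: b :: t =>
      set L := a :: b :: t with hLdef
      have hn : 2 ≤ L.length := by simp [hLdef]
      set h := L.length / 2 with hh
      have hh1 : 1 ≤ h := by omega
      have hhlt : h < L.length := by omega
      have hTake : (L.take h).length = h := by
        rw [List.length_take]; omega
      have hDrop : (L.drop h).length = L.length - h := by
        rw [List.length_drop]
      show encGo f (L.take h) <<< (L.length - h) ||| encGo f (L.drop h) = L.foldl parAcc 0
      rw [ih (L.take h) (by omega), ih (L.drop h) (by omega)]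
      have hlt : (L.drop h).foldl parAcc 0 < 2 ^ (L.length - h) := by
        have := foldl_parAcc_lt (L.drop h)
        rwa [hDrop] at this
      rw [shl_or_eq_add _ _ _ hlt]
      conv_rhs =>
        rw [← List.take_append_drop h L, List.foldl_append,
            foldl_parAcc_shift (L.drop h), hDrop]

-- the w least-significant binary digits, LSB first (proof-side helper)
def bitsW : Nat → Nat → List Int
  | 0, _ => []
  | w + 1, x => ((x % 2 : Nat) : Int) :: bitsW w (x / 2)

-- the binary digits of x, LSB first (proof-side helper; fuel = x bounds the iterations)
def bitsGo : Nat → Nat → List Int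
  | _, 0 => []
  | 0, _ + 1 => []
  | f + 1, x + 1 => (((x + 1) % 2 : Nat) : Int) :: bitsGo f ((x + 1) / 2)

def bitsLSB (x : Nat) : List Int := bitsGo x x

theorem bitsGo_congr (x : Nat) : ∀ f g, x ≤ f → x ≤ g → bitsGo f x = bitsGo g x := by
  induction x using Nat.strong_induction_on with
  | _ x ih =>
    intro f g hf hg
    cases x with
    | zero => cases f <;> cases g <;> rfl
    | succ y =>
      cases f with
      | zero => omega
      | succ f' =>
        cases g with
        | zero => omega
        | succ g' =>
          simp only [bitsGo]
          congr 1
          exact ih ((y + 1) / 2) (by omega) f' g' (by omega) (by omega)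

theorem bitsLSB_step (x : Nat) (hx : 0 < x) :
    bitsLSB x = ((x % 2 : Nat) : Int) :: bitsLSB (x / 2) := by
  obtain ⟨y, rfl⟩ : ∃ y, x = y + 1 := ⟨x - 1, by omega⟩
  show bitsGo (y + 1) (y + 1) = _ :: bitsGo ((y + 1) / 2) ((y + 1) / 2)
  simp only [bitsGo]
  congr 1
  exact bitsGo_congr ((y + 1) / 2) y ((y + 1) / 2) (by omega) (by omega)

-- splitting the width splits the digits at a mod/div boundary
theorem bitsW_split (h : Nat) : ∀ (w x : Nat), h ≤ w →
    bitsW w x = bitsW h (x % 2 ^ h) ++ bitsW (w - h) (x / 2 ^ h) := by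
  induction h with
  | zero => intro w x _; simp [bitsW]
  | succ h ih =>
    intro w x hw
    obtain ⟨w', rfl⟩ : ∃ w', w = w' + 1 := ⟨w - 1, by omega⟩
    have e1 : x % 2 ^ (h + 1) % 2 = x % 2 := by
      rw [Nat.mod_mod_of_dvd x ⟨2 ^ h, by rw [pow_succ]; ring⟩]
    have e2 : x % 2 ^ (h + 1) / 2 = x / 2 % 2 ^ h := by
      rw [pow_succ, mul_comm]
      exact Nat.mod_mul_right_div_self x 2 (2 ^ h)
    have e3 : x / 2 ^ (h + 1) = x / 2 / 2 ^ h := by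
      rw [pow_succ, mul_comm, ← Nat.div_div_eq_div_mul]
    simp only [bitsW, e1, e2, e3, Nat.succ_sub_succ]
    rw [ih w' (x / 2) (by omega)]
    simp

-- B's divide-and-conquer decoder produces the w-bit digit string, MSB first
theorem decGo_eq (f : Nat) : ∀ (w x : Nat), w ≤ f → x < 2 ^ w →
    decGo f x w = (bitsW w x).reverse := by
  induction f with
  | zero =>
    intro w x hw hx
    match w with
    | 0 => rfl
    | 1 => omega
    | w + 2 => omega
  | succ f ih =>
    intro w x hw hx
    match w with
    | 0 => rfl
    | 1 =>
      show [(x : Int)] = _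
      simp [bitsW, Nat.mod_eq_of_lt (by omega : x < 2)]
    | w + 2 =>
      set h := (w + 2) / 2 with hh
      have hh1 : 1 ≤ h := by omega
      have hh2 : h ≤ w + 1 := by omega
      show decGo f (x >>> h) (w + 2 - h) ++ decGo f (x &&& (1 <<< h - 1)) h = _
      rw [Nat.shiftRight_eq_div_pow, Nat.one_shiftLeft, Nat.and_two_pow_sub_one_eq_mod]
      have hdivlt : x / 2 ^ h < 2 ^ (w + 2 - h) := by
        rw [Nat.div_lt_iff_lt_mul (Nat.two_pow_pos h)]
        calc x < 2 ^ (w + 2) := hx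
          _ = 2 ^ (w + 2 - h) * 2 ^ h := by rw [← pow_add]; congr 1; omega
      have hmodlt : x % 2 ^ h < 2 ^ h := Nat.mod_lt x (Nat.two_pow_pos h)
      rw [ih (w + 2 - h) (x / 2 ^ h) (by omega) hdivlt,
          ih h (x % 2 ^ h) (by omega) hmodlt]
      rw [bitsW_split h (w + 2) x (by omega)]
      simp

-- at the exact bit length, the fixed-width digits are the digits
theorem bitsW_bitLength (x : Nat) : 0 < x →
    bitsW (PySem.Int.bitLength (x : Int)) x = bitsLSB x := by
  induction x using Nat.strong_induction_on with
  | _ x ih =>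
    intro hx
    rw [PySem.Int.bitLength_natCast hx, bitsLSB_step x hx]
    simp only [bitsW]
    congr 1
    by_cases h0 : x / 2 = 0
    · rw [h0]
      simp [PySem.Int.bitLength_zero, bitsW, bitsLSB, bitsGo]
    · exact ih (x / 2) (by omega) (by omega)

-- the accumulator only grows
theorem foldl_parAcc_le (L : List Int) : ∀ n : Nat, n ≤ L.foldl parAcc n := by
  induction L with
  | nil => simp
  | cons a t ih =>
    intro n
    calc n ≤ parAcc n a := by unfold parAcc; omega
    _ ≤ t.foldl parAcc (parAcc n a) := ih _
    _ = (a :: t).foldl parAcc n := by simp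

-- decoding the encoding of a 0/1 list with nonzero seed reproduces the list (reversed)
theorem bitsLSB_foldl (M : List Int) (hM : ∀ a ∈ M, a = 0 ∨ a = 1) :
    ∀ n : Nat, 0 < n → bitsLSB (M.foldl parAcc n) = M.reverse ++ bitsLSB n := by
  induction M using List.reverseRecOn with
  | nil => intro n _; simp
  | append_singleton N b ih =>
    intro n hn
    have hN : ∀ a ∈ N, a = 0 ∨ a = 1 := fun a ha => hM a (by simp [ha])
    have hb : b = 0 ∨ b = 1 := hM b (by simp)
    have hk : 0 < N.foldl parAcc n := lt_of_lt_of_le hn (foldl_parAcc_le N n)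
    have hbits : (PySem.Int.band b 1).toNat < 2 := parBit_lt_two b
    rw [List.foldl_append, List.foldl_cons, List.foldl_nil]
    set k := N.foldl parAcc n with hkdef
    have hpos : 0 < parAcc k b := by unfold parAcc; omega
    rw [bitsLSB_step _ hpos]
    have h2 : parAcc k b % 2 = (PySem.Int.band b 1).toNat := by unfold parAcc; omega
    have h3 : parAcc k b / 2 = k := by unfold parAcc; omega
    rw [h2, h3, ih hN n hn]
    have hcast : ((PySem.Int.band b 1).toNat : Int) = b := by
      rcases hb with h | h <;> subst h <;> decide
    simp [hcast, List.reverse_append]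

-- every element of A's elementwise loop output is a bit
theorem zip_mod_bits (X : List Int) : ∀ (Y : List Int),
    ∀ a ∈ List.zipWith (fun a b => PySem.Int.mod (a + b) 2) X Y, a = 0 ∨ a = 1 := by
  induction X with
  | nil => simp
  | cons x tx ih =>
    intro Y a ha
    cases Y with
    | nil => simp at ha
    | cons y ty =>
      simp only [List.zipWith_cons_cons, List.mem_cons] at ha
      rcases ha with rfl | ha
      · have h1 := PySem.Int.mod_nonneg (x + y) (b := 2) (by norm_num)
        have h2 := PySem.Int.mod_lt (x + y) (b := 2) (by norm_num)
        omega
      · exact ih ty a ha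

-- deleteExtraZeros of a 0/1 list is the decoded form of its encoding
theorem delZeros_eq_decode (L : List Int) (hL : ∀ a ∈ L, a = 0 ∨ a = 1) :
    delZeros L = if L.foldl parAcc 0 = 0 then [0] else (bitsLSB (L.foldl parAcc 0)).reverse := by
  induction L with
  | nil => simp [delZeros]
  | cons a t ih =>
    have ht : ∀ x ∈ t, x = 0 ∨ x = 1 := fun x hx => hL x (by simp [hx])
    rcases hL a (by simp) with h | h
    · subst h
      simpa [delZeros, parAcc] using ih ht
    · subst h
      have hpar : parAcc 0 1 = 1 := by decide
      have hpos : 0 < t.foldl parAcc 1 := lt_of_lt_of_le (by norm_num) (foldl_parAcc_le t 1)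
      simp only [delZeros, List.foldl_cons, hpar, if_neg (by omega : ¬ t.foldl parAcc 1 = 0),
        if_neg (by norm_num : ¬ (1:Int) = 0)]
      rw [bitsLSB_foldl t ht 1 (by norm_num)]
      have h1 : bitsLSB 1 = [(1:Int)] := by
        rw [bitsLSB_step 1 (by norm_num)]; rfl
      simp [h1]

-- B's if-branch: the decoder at exact bit length is the reversed LSB digit list
theorem dec_eq (x : Nat) (hx : 0 < x) :
    dec x (PySem.Int.bitLength (x : Int)) = (bitsLSB x).reverse := by
  have hlt : x < 2 ^ PySem.Int.bitLength (x : Int) := by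
    have := PySem.Int.lt_two_pow_bitLength (x : Int)
    simpa using this
  unfold dec
  rw [decGo_eq _ _ _ le_rfl hlt, bitsW_bitLength x hx]

theorem galueAdd_eq (A B : List Int) : galueAdd A B = galueAdd_alt A B := by
  simp only [galueAdd, galueAdd_alt]
  have hencA : enc A = A.foldl parAcc 0 := encGo_eq A.length A le_rfl
  have hencB : enc B = B.foldl parAcc 0 := encGo_eq B.length B le_rfl
  set X := delZeros A with hX
  set Y := delZeros B with hY
  rw [makeEq_eq]
  simp only
  have hlen : (List.replicate (Y.length - X.length) (0:Int) ++ X).length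
      = (List.replicate (X.length - Y.length) (0:Int) ++ Y).length := by simp; omega
  rw [loopA_eq_zipWith _ _ hlen]
  set Z := List.zipWith (fun a b => PySem.Int.mod (a + b) 2)
      (List.replicate (Y.length - X.length) (0:Int) ++ X)
      (List.replicate (X.length - Y.length) (0:Int) ++ Y) with hZ
  rw [delZeros_eq_decode Z (hZ ▸ zip_mod_bits _ _)]
  have hmask : Z.foldl parAcc 0 = A.foldl parAcc 0 ^^^ B.foldl parAcc 0 := by
    have := mask_zipWith
      (List.replicate (Y.length - X.length) (0:Int) ++ X)
      (List.replicate (X.length - Y.length) (0:Int) ++ Y) hlen 0 0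
    calc Z.foldl parAcc 0 = X.foldl parAcc 0 ^^^ Y.foldl parAcc 0 := by
          rw [hZ]; simpa [List.foldl_append, mask_rep] using this
      _ = A.foldl parAcc 0 ^^^ B.foldl parAcc 0 := by
          rw [hX, hY, mask_delZeros, mask_delZeros]
  rw [hmask, hencA, hencB]
  by_cases h0 : A.foldl parAcc 0 ^^^ B.foldl parAcc 0 = 0
  · simp [h0]
  · rw [if_neg h0, if_neg h0, dec_eq _ (by omega)]

-- ===== VERDICT (by name: the statement is the Claim_ definition above) =====
theorem galueAdd_spec : Claim_equal_galueAdd := by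
  intro A B _
  unfold Spec_galueAdd
  exact galueAdd_eq A B
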